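-- pv_equiv track=rewrite | github.com/yoimerdr/py2ren | py2ren/utils/__init__.py | rowchars
-- ===== SOURCE A (Python) =====
-- def rowchars(text, char, start=0):
--     count = 0
--     for ch in text[start:]:
--         if ch == char:
--             count += 1
--         elif count != 0:
--             break
--     return -1 if count == 0 else count
-- ===== SOURCE B (Python) =====
-- def rowchars(text, char, start=0):
--     s = text[start:]
--     if len(char) != 1:
--         return -1
--     i = s.find(char)
--     if i == -1:
--         return -1
--     return len(s) - i - len(s[i:].lstrip(char))
-- ===== Notes on version B (the rewrite author's own statement) =====
-- stated objective: idiomatic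
-- what changed: B replaces A's single counting scan with break by staged string primitives: slice, a length-1 check on char, s.find(char) for the first occurrence, and len arithmetic with lstrip(char) to measure the run, with no explicit loop.
import Mathlib
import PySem

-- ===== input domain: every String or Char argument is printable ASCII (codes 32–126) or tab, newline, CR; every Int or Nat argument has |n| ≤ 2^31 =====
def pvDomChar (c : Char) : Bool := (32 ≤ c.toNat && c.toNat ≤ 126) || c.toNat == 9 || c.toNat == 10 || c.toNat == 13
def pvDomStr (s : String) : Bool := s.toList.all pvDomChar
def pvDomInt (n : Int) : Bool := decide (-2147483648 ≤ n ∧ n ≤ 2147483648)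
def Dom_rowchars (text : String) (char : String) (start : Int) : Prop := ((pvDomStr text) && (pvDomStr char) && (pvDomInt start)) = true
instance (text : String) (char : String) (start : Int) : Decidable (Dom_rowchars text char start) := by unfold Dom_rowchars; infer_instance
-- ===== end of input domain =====

-- B replaces A's counting scan-with-break by staged string primitives: find the first occurrence
-- of char, then measure the run by lstrip and length arithmetic (idiomatic; no speed claim).

-- ===== PORT A =====
-- A's for-loop: state is 'count'; 'elif count != 0: break' ends the loop returning count
def rowcharsLoopA (char : String) : List Char → Int → Int
  | [], count => count
  | ch :: rest, count =>
      if char.toList = [ch] then rowcharsLoopA char rest (count + 1)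
      else if count ≠ 0 then count
      else rowcharsLoopA char rest count

def rowchars (text : String) (char : String) (start : Int) : Int :=
  let count := rowcharsLoopA char (PySem.List.slice text.toList (some start) none) 0
  if count = 0 then -1 else count

-- ===== PORT B =====
-- s.lstrip(char) for a single-character strip set: drop the leading run of c (exact there)
def pvLstrip (c : Char) : List Char → List Char
  | [] => []
  | d :: t => if d = c then pvLstrip c t else d :: t

def rowchars_alt (text : String) (char : String) (start : Int) : Int :=
  let s := PySem.List.slice text.toList (some start) none      -- s = text[start:]
  match char.toList with
  | [c] =>                                                     -- len(char) == 1
      let i := PySem.Chars.find s [c]                          -- i = s.find(char)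
      if i = -1 then -1
      else (s.length : Int) - i - ((pvLstrip c (PySem.List.slice s (some i) none)).length : Int)
  | _ => -1                                                    -- len(char) != 1: no single character can equal char

-- ===== PRECONDITION & SPEC =====
def Spec_rowchars (text : String) (char : String) (start : Int) (out : Int) : Prop := out = rowchars_alt text char start
instance (text : String) (char : String) (start : Int) (out : Int) : Decidable (Spec_rowchars text char start out) := by unfold Spec_rowchars; infer_instance

-- ===== CLAIM (what is proved, stated in full; the proofs are below) =====
def Claim_equal_rowchars : Prop := ∀ (text : String) (char : String) (start : Int), Dom_rowchars text char start → Spec_rowchars text char start (rowchars text char start)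

-- ===== LEMMAS AND PROOFS =====

-- length of the leading run of c (proof-side notion relating the two programs)
def pvRunLen (c : Char) : List Char → Nat
  | [] => 0
  | d :: t => if d = c then 1 + pvRunLen c t else 0

theorem pvLstrip_len (c : Char) (l : List Char) :
    (pvLstrip c l).length + pvRunLen c l = l.length := by
  induction l with
  | nil => simp [pvLstrip, pvRunLen]
  | cons d t ih =>
      simp only [pvLstrip, pvRunLen]
      split
      · simp; omega
      · simp

-- if no element of l ever equals char (as a 1-char string), A's loop keeps count = 0
theorem loopA_zero (char : String) (l : List Char) (h : ∀ d ∈ l, char.toList ≠ [d]) :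
    rowcharsLoopA char l 0 = 0 := by
  induction l with
  | nil => rfl
  | cons d t ih =>
      simp only [rowcharsLoopA]
      rw [if_neg (h d (by simp)), if_neg (show ¬ (0 : Int) ≠ 0 by simp)]
      exact ih fun e he => h e (by simp [he])

-- once count is positive, A's loop adds the length of the leading run of c and stops
theorem loopA_pos (char : String) (c : Char) (h : char.toList = [c])
    (l : List Char) (n : Int) (hn : 0 < n) :
    rowcharsLoopA char l n = n + (pvRunLen c l : Int) := by
  induction l generalizing n with
  | nil => simp [rowcharsLoopA, pvRunLen]
  | cons d t ih =>
      simp only [rowcharsLoopA, pvRunLen]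
      by_cases hd : d = c
      · subst hd
        rw [if_pos h, if_pos rfl, ih (n + 1) (by omega)]
        push_cast; ring
      · have hne : char.toList ≠ [d] := by
          rw [h]; intro e; exact hd (List.cons.injEq .. ▸ e).1.symm
        rw [if_neg hne, if_neg hd, if_pos (by omega : n ≠ 0)]
        simp

-- while no occurrence of c has been passed, A's loop merely advances: it agrees on s and s.drop n
theorem loopA_skip (char : String) (c : Char) (h : char.toList = [c]) :
    ∀ (s : List Char) (n : Nat), (∀ j < n, ¬ [c] <+: s.drop j) →
      rowcharsLoopA char s 0 = rowcharsLoopA char (s.drop n) 0 := by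
  intro s
  induction s with
  | nil => intro n _; simp
  | cons d t ih =>
      intro n hj
      match n with
      | 0 => rfl
      | n + 1 =>
          have hd : d ≠ c := by
            intro e; exact hj 0 (by omega) (by simp [e])
          have hne : char.toList ≠ [d] := by
            rw [h]; intro e; exact hd (List.cons.injEq .. ▸ e).1.symm
          simp only [rowcharsLoopA]
          rw [if_neg hne, if_neg (show ¬ (0 : Int) ≠ 0 by simp), List.drop_succ_cons]
          exact ih n fun j hjn => by
            have := hj (j + 1) (by omega)
            simpa using this

-- ===== VERDICT (by name: the statement is the Claim_ definition above) =====
theorem rowchars_spec : Claim_equal_rowchars := by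
  intro text char start _
  unfold Spec_rowchars rowchars rowchars_alt
  dsimp only
  set s := PySem.List.slice text.toList (some start) none with hs
  rcases hc : char.toList with _ | ⟨c, _ | ⟨c2, r⟩⟩
  · -- char = "" : never matches any single character
    rw [loopA_zero char s (by simp [hc])]
    simp
  · -- len(char) == 1
    dsimp only
    by_cases hf : PySem.Chars.find s [c] = -1
    · -- not found: both return -1
      have hinf : ¬ [c] <:+: s := (PySem.Chars.find_eq_neg_one_iff s [c]).mp hf
      have hz : rowcharsLoopA char s 0 = 0 := by
        apply loopA_zero
        intro d hd e
        rw [hc] at e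
        have hdc : d = c := (List.cons.injEq .. ▸ e).1.symm
        subst hdc
        obtain ⟨l1, l2, hsplit⟩ := List.append_of_mem hd
        exact hinf ⟨l1, l2, by rw [hsplit]; simp⟩
      rw [hz]
      simp [hf]
    · have hinf : [c] <:+: s := (PySem.Chars.find_ne_neg_one_iff s [c]).mp hf
      have hnn : 0 ≤ PySem.Chars.find s [c] := (PySem.Chars.find_nonneg_iff s [c]).mpr hinf
      set n : Nat := (PySem.Chars.find s [c]).toNat with hn
      have hcast : ((n : Int)) = PySem.Chars.find s [c] := Int.toNat_of_nonneg hnn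
      obtain ⟨hpref, hbefore⟩ := PySem.Chars.find_spec hnn
      obtain ⟨t, ht⟩ := hpref
      have hdrop : List.drop n s = c :: t := by rw [← ht]; rfl
      have hlenf : PySem.Chars.find s [c] ≤ (s.length : Int) := PySem.Chars.find_le_length s [c]
      have hnle : n ≤ s.length := by omega
      have hA : rowcharsLoopA char s 0 = 1 + (pvRunLen c t : Int) := by
        rw [loopA_skip char c hc s n hbefore, hdrop]
        simp only [rowcharsLoopA]
        rw [if_pos hc, loopA_pos char c hc t (0 + 1) (by omega)]
        push_cast; ring
      rw [if_neg hf, ← hcast, PySem.List.slice_from s (Int.natCast_nonneg n),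
        Int.toNat_natCast, hdrop, hA, if_neg (by omega)]
      have h1 := pvLstrip_len c t
      have h2 : (c :: t).length = s.length - n := by rw [← hdrop, List.length_drop]
      simp only [pvLstrip]
      simp only [List.length_cons] at h2
      push_cast
      omega
  · -- len(char) ≥ 2 : never matches a single character
    rw [loopA_zero char s (by simp [hc])]
    simp
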